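-- pv_equiv track=rewrite | github.com/Surya-827/Daily-CodingProgramming | Others/GoodOrBadString.py | isGoodorBad
-- ===== SOURCE A (Python) =====
-- def isGoodorBad(S):
--     v = "aeiou"
--     def isV(p):
--         return all([(x in v or x is "?") for x in p])
--     def isC(p):
--         return all([(x not in v or x is "?") for x in p])
--     j = 0
--     n = len(S)
--
--     while j < n:
--         # check for a bad substring
--         if (j + 5 < n and isV(S[j:j + 6])) or (j + 3 < n and isC(S[j:j + 4])):
--             return 0
--         else:
--             j += 1
--     return 1
-- ===== SOURCE B (Python) =====
-- def isGoodorBad(S):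
--     vrun = crun = 0
--     for c in S:
--         if c in "aeiou" or c == '?':
--             vrun += 1
--         else:
--             vrun = 0
--         if c not in "aeiou":
--             crun += 1
--         else:
--             crun = 0
--         if vrun == 6 or crun == 4:
--             return 0
--     return 1
-- ===== Notes on version B (the rewrite author's own statement) =====
-- stated objective: simpler
-- what changed: Replaces the per-position fixed-window slice-and-all() re-scans with a single left-to-right pass maintaining two running run-length counters (vowel-or-'?' run and non-vowel run), returning 0 as soon as a run reaches 6 resp. 4.
import Mathlib
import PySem

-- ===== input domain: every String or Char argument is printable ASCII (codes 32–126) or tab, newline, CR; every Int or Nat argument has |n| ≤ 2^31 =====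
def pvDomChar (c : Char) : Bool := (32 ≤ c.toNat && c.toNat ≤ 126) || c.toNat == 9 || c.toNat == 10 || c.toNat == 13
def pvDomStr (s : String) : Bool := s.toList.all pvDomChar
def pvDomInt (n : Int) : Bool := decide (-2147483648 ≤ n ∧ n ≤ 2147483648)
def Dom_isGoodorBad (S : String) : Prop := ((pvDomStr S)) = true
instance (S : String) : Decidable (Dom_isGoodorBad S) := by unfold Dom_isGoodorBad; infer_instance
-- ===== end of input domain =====

-- B replaces A's per-position fixed-window slice re-scans with a simpler single pass that
-- maintains two running run-length counters; same return value on every string.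

-- ===== PORT A =====
-- isV(p): all([(x in v or x is "?") for x in p])  (CPython interns 1-char strings, so `is "?"` behaves as == here)
def pvIsV (p : List Char) : Bool := p.all (fun x => "aeiou".toList.contains x || x == '?')
-- isC(p): all([(x not in v or x is "?") for x in p])
def pvIsC (p : List Char) : Bool := p.all (fun x => !("aeiou".toList.contains x) || x == '?')

-- the while loop over j
def loopA (L : List Char) (j : Nat) : Int :=
  if _h : j < L.length then
    if (decide (j + 5 < L.length) && pvIsV (PySem.List.slice L (some (j : Int)) (some ((j : Int) + 6)))) ||
       (decide (j + 3 < L.length) && pvIsC (PySem.List.slice L (some (j : Int)) (some ((j : Int) + 4)))) then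
      0
    else
      loopA L (j + 1)
  else 1
termination_by L.length - j

def isGoodorBad (S : String) : Int := loopA S.toList 0

-- ===== PORT B =====
-- one pass, two run counters (vowel-or-'?' run, non-vowel run)
def loopB (l : List Char) (vr cr : Nat) : Int :=
  match l with
  | [] => 1
  | c :: t =>
    let vr' := if "aeiou".toList.contains c || c == '?' then vr + 1 else 0
    let cr' := if !("aeiou".toList.contains c) then cr + 1 else 0
    if vr' == 6 || cr' == 4 then 0 else loopB t vr' cr'

def isGoodorBad_alt (S : String) : Int := loopB S.toList 0 0

-- ===== PRECONDITION & SPEC =====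
def Spec_isGoodorBad (S : String) (out : Int) : Prop := out = isGoodorBad_alt S
instance (S : String) (out : Int) : Decidable (Spec_isGoodorBad S out) := by unfold Spec_isGoodorBad; infer_instance

-- ===== CLAIM (what is proved, stated in full; the proofs are below) =====
def Claim_equal_isGoodorBad : Prop := ∀ (S : String), Dom_isGoodorBad S → Spec_isGoodorBad S (isGoodorBad S)

-- ===== LEMMAS AND PROOFS =====

-- character predicates of the two runs
def vwP (c : Char) : Bool := "aeiou".toList.contains c || c == '?'
def cwP (c : Char) : Bool := !("aeiou".toList.contains c)

-- run-length counter over a processed prefix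
def runOf (f : Char → Bool) (p : List Char) : Nat := p.foldl (fun a c => if f c then a + 1 else 0) 0

-- "a bad window starts at i"
def winB (L : List Char) (i : Nat) : Bool :=
  (decide (i + 5 < L.length) && ((L.drop i).take 6).all vwP) ||
  (decide (i + 3 < L.length) && ((L.drop i).take 4).all cwP)

-- "a bad window starts at some i ≥ j"
def badF (L : List Char) (j : Nat) : Bool := (List.range L.length).any (fun i => decide (j ≤ i) && winB L i)

lemma cw_drop_q (x : Char) : (!("aeiou".toList.contains x) || x == '?') = !("aeiou".toList.contains x) := by
  by_cases h : x = '?'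
  · subst h; rfl
  · simp [beq_eq_false_iff_ne.mpr h]

lemma pvIsV_eq (p : List Char) : pvIsV p = p.all vwP := rfl

lemma pvIsC_eq (p : List Char) : pvIsC p = p.all cwP := by
  unfold pvIsC cwP
  rw [funext cw_drop_q]

lemma runOf_append (f : Char → Bool) (p : List Char) (c : Char) :
    runOf f (p ++ [c]) = if f c then runOf f p + 1 else 0 := by
  simp [runOf, List.foldl_append]

-- the run counter counts exactly the maximal satisfying suffix
lemma run_ge (f : Char → Bool) (q : List Char) (k : Nat) :
    k ≤ runOf f q ↔ k ≤ q.length ∧ (q.drop (q.length - k)).all f = true := by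
  induction q using List.reverseRecOn generalizing k with
  | nil => simp [runOf]
  | append_singleton q₀ c ih =>
    rw [runOf_append]
    rcases Nat.eq_zero_or_pos k with hk | hk
    · subst hk; simp
    · have hlen : (q₀ ++ [c]).length = q₀.length + 1 := by simp
      have hd : (q₀ ++ [c]).drop ((q₀ ++ [c]).length - k) = q₀.drop (q₀.length - (k - 1)) ++ [c] := by
        have he : q₀.length + 1 - k = q₀.length - (k - 1) := by omega
        rw [hlen, List.drop_append_of_le_length (by omega), he]
      rw [hd, hlen, List.all_append]
      by_cases hf : f c = true
      · rw [if_pos hf]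
        constructor
        · intro h
          obtain ⟨h1, h2⟩ := (ih (k - 1)).mp (by omega)
          refine ⟨by omega, ?_⟩
          simp [h2, hf]
        · rintro ⟨h1, h2⟩
          rw [Bool.and_eq_true] at h2
          have := (ih (k - 1)).mpr ⟨by omega, h2.1⟩
          omega
      · rw [if_neg hf]
        constructor
        · intro h; omega
        · rintro ⟨h1, h2⟩
          rw [Bool.and_eq_true] at h2
          simp [hf] at h2

-- windows survive appending on the right
lemma winB_append (L r : List Char) (i : Nat) (h : winB L i = true) : winB (L ++ r) i = true := by
  simp only [winB, Bool.or_eq_true, Bool.and_eq_true, decide_eq_true_eq] at h ⊢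
  have hlen : (L ++ r).length = L.length + r.length := by simp
  rcases h with ⟨h1, h2⟩ | ⟨h1, h2⟩
  · left
    refine ⟨by omega, ?_⟩
    rw [List.drop_append_of_le_length (by omega),
        List.take_append_of_le_length (by simp [List.length_drop]; omega)]
    exact h2
  · right
    refine ⟨by omega, ?_⟩
    rw [List.drop_append_of_le_length (by omega),
        List.take_append_of_le_length (by simp [List.length_drop]; omega)]
    exact h2

-- a run reaching k yields a window of length k at the end
lemma win_of_run_vw (q : List Char) (h : 6 ≤ runOf vwP q) : winB q (q.length - 6) = true := by
  obtain ⟨h1, h2⟩ := (run_ge vwP q 6).mp h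
  simp only [winB, Bool.or_eq_true, Bool.and_eq_true, decide_eq_true_eq]
  left
  refine ⟨by omega, ?_⟩
  rw [List.take_of_length_le (by simp [List.length_drop]; omega)]
  exact h2

lemma win_of_run_cw (q : List Char) (h : 4 ≤ runOf cwP q) : winB q (q.length - 4) = true := by
  obtain ⟨h1, h2⟩ := (run_ge cwP q 4).mp h
  simp only [winB, Bool.or_eq_true, Bool.and_eq_true, decide_eq_true_eq]
  right
  refine ⟨by omega, ?_⟩
  rw [List.take_of_length_le (by simp [List.length_drop]; omega)]
  exact h2

-- the loop guard of A is winB (slices and the comprehensions rewritten)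
lemma slice_drop_take (L : List Char) (j n : Nat) :
    PySem.List.slice L (some (j : Int)) (some ((j : Int) + (n : Int))) = (L.drop j).take n := by
  rw [show ((j : Int) + (n : Int)) = (((j + n : Nat)) : Int) by push_cast; ring, PySem.List.slice_natCast]
  congr 1
  omega

lemma guard_eq_winB (L : List Char) (j : Nat) :
    ((decide (j + 5 < L.length) && pvIsV (PySem.List.slice L (some (j : Int)) (some ((j : Int) + 6)))) ||
     (decide (j + 3 < L.length) && pvIsC (PySem.List.slice L (some (j : Int)) (some ((j : Int) + 4))))) =
    winB L j := by
  rw [show ((j : Int) + 6) = ((j : Int) + ((6 : Nat) : Int)) by norm_num,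
      show ((j : Int) + 4) = ((j : Int) + ((4 : Nat) : Int)) by norm_num,
      slice_drop_take, slice_drop_take, pvIsV_eq, pvIsC_eq]
  rfl

lemma badF_of_win (L : List Char) (i : Nat) (h : winB L i = true) : badF L 0 = true := by
  have hlt : i < L.length := by
    simp only [winB, Bool.or_eq_true, Bool.and_eq_true, decide_eq_true_eq] at h
    rcases h with ⟨h1, _⟩ | ⟨h1, _⟩ <;> omega
  simp only [badF, List.any_eq_true, List.mem_range]
  exact ⟨i, hlt, by simp [h]⟩

lemma badF_step (L : List Char) (j : Nat) (h : winB L j = false) : badF L j = badF L (j + 1) := by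
  apply Bool.eq_iff_iff.mpr
  simp only [badF, List.any_eq_true, List.mem_range, Bool.and_eq_true, decide_eq_true_eq]
  constructor
  · rintro ⟨i, hi, hji, hwin⟩
    refine ⟨i, hi, ?_, hwin⟩
    rcases Nat.eq_or_lt_of_le hji with rfl | h'
    · rw [hwin] at h; cases h
    · omega
  · rintro ⟨i, hi, hji, hwin⟩
    exact ⟨i, hi, by omega, hwin⟩

-- A's loop decides "is there a window at some i ≥ j"
lemma loopA_eq (L : List Char) (j : Nat) : loopA L j = if badF L j = true then 0 else 1 := by
  fun_induction loopA L j with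
  | case1 j h hguard =>
    rw [guard_eq_winB] at hguard
    rw [if_pos ?_]
    simp only [badF, List.any_eq_true, List.mem_range]
    exact ⟨j, h, by simp [hguard]⟩
  | case2 j h hguard ih =>
    rw [guard_eq_winB, Bool.not_eq_true] at hguard
    rw [ih, badF_step L j hguard]
  | case3 j h =>
    rw [if_neg ?_]
    simp only [badF, List.any_eq_true, List.mem_range, Bool.and_eq_true, decide_eq_true_eq,
      not_exists, not_and]
    intro i hi hji
    omega

-- no window ends strictly inside p, and runs below threshold rule out one ending at c
lemma no_new_win (p : List Char) (c : Char) (hw : badF p 0 = false)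
    (hv : runOf vwP (p ++ [c]) < 6) (hc : runOf cwP (p ++ [c]) < 4) :
    badF (p ++ [c]) 0 = false := by
  by_contra hbad
  rw [Bool.not_eq_false] at hbad
  simp only [badF, List.any_eq_true, List.mem_range, Bool.and_eq_true, decide_eq_true_eq] at hbad
  obtain ⟨i, hi, -, hwin⟩ := hbad
  have hlen : (p ++ [c]).length = p.length + 1 := by simp
  simp only [winB, Bool.or_eq_true, Bool.and_eq_true, decide_eq_true_eq, hlen] at hwin
  rcases hwin with ⟨h1, h2⟩ | ⟨h1, h2⟩
  · by_cases hin : i + 6 ≤ p.length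
    · have hpwin : winB p i = true := by
        simp only [winB, Bool.or_eq_true, Bool.and_eq_true, decide_eq_true_eq]
        left
        refine ⟨by omega, ?_⟩
        rwa [List.drop_append_of_le_length (by omega),
             List.take_append_of_le_length (by simp [List.length_drop]; omega)] at h2
      rw [badF_of_win p i hpwin] at hw; cases hw
    · have hie : i = p.length + 1 - 6 := by omega
      have ht : ((p ++ [c]).drop i).take 6 = (p ++ [c]).drop ((p ++ [c]).length - 6) := by
        rw [List.take_of_length_le (by simp [List.length_drop]; omega), hlen, hie]
      rw [ht] at h2
      have := (run_ge vwP (p ++ [c]) 6).mpr ⟨by omega, h2⟩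
      omega
  · by_cases hin : i + 4 ≤ p.length
    · have hpwin : winB p i = true := by
        simp only [winB, Bool.or_eq_true, Bool.and_eq_true, decide_eq_true_eq]
        right
        refine ⟨by omega, ?_⟩
        rwa [List.drop_append_of_le_length (by omega),
             List.take_append_of_le_length (by simp [List.length_drop]; omega)] at h2
      rw [badF_of_win p i hpwin] at hw; cases hw
    · have hie : i = p.length + 1 - 4 := by omega
      have ht : ((p ++ [c]).drop i).take 4 = (p ++ [c]).drop ((p ++ [c]).length - 4) := by
        rw [List.take_of_length_le (by simp [List.length_drop]; omega), hlen, hie]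
      rw [ht] at h2
      have := (run_ge cwP (p ++ [c]) 4).mpr ⟨by omega, h2⟩
      omega

-- B's loop invariant
lemma loopB_eq (l p : List Char) (hv : runOf vwP p < 6) (hc : runOf cwP p < 4)
    (hw : badF p 0 = false) :
    loopB l (runOf vwP p) (runOf cwP p) = if badF (p ++ l) 0 = true then 0 else 1 := by
  induction l generalizing p with
  | nil => simp [loopB, hw]
  | cons c t ih =>
    simp only [loopB,
      show (fun c => ("aeiou".toList.contains c || c == '?')) c = vwP c from rfl]
    rw [show (!("aeiou".toList.contains c)) = cwP c from rfl,
        ← runOf_append, ← runOf_append,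
        show p ++ c :: t = (p ++ [c]) ++ t by simp]
    by_cases hhit : (runOf vwP (p ++ [c]) == 6 || runOf cwP (p ++ [c]) == 4) = true
    · rw [if_pos hhit]
      simp only [Bool.or_eq_true, beq_iff_eq] at hhit
      have hwin : badF ((p ++ [c]) ++ t) 0 = true := by
        rcases hhit with h6 | h4
        · exact badF_of_win _ _ (winB_append _ t _ (win_of_run_vw (p ++ [c]) (by omega)))
        · exact badF_of_win _ _ (winB_append _ t _ (win_of_run_cw (p ++ [c]) (by omega)))
      rw [if_pos hwin]
    · rw [if_neg hhit]
      simp only [Bool.or_eq_true, beq_iff_eq, not_or] at hhit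
      have hva : runOf vwP (p ++ [c]) ≤ runOf vwP p + 1 := by
        rw [runOf_append]; split <;> omega
      have hca : runOf cwP (p ++ [c]) ≤ runOf cwP p + 1 := by
        rw [runOf_append]; split <;> omega
      exact ih (p ++ [c]) (by omega) (by omega)
        (no_new_win p c hw (by omega) (by omega))

-- ===== VERDICT (by name: the statement is the Claim_ definition above) =====
theorem isGoodorBad_spec : Claim_equal_isGoodorBad := by
  intro S _
  unfold Spec_isGoodorBad isGoodorBad isGoodorBad_alt
  have hB := loopB_eq S.toList [] (by simp [runOf]) (by simp [runOf]) (by simp [badF])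
  simp only [runOf, List.foldl_nil, List.nil_append] at hB
  rw [loopA_eq, hB]
  rfl
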